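-- pv_equiv track=rewrite | github.com/Heph21/OR-group-5- | Case4bas.py | dataType
-- ===== SOURCE A (Python) =====
-- def dataType(vI):
--     """
--     Purpose: to check whether the vector contains both positive and negative elements
--
--     Input:
--         vI, vector of integers
--
--     Output:
--         We return:
--             1   if the vector contains only positive numbers (and zeros)
--             0   if the vector contains both positive and negative numbers
--             -1  if the vector contains no positive numbers
--     """
--     iPos = 0    # keep count of strictly positive elements of vI
--     iNeg = 0    # keep count of strictly negative elements of vI
--
--     for i in vI:
--         if(i > 0):
--             iPos += 1
--         elif(i < 0):
--             iNeg += 1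
--
--     if((iPos > 0) & (iNeg == 0)):
--         return 1
--     elif((iPos == 0) & (iNeg >= 0)):
--         return -1
--     else:
--         return 0
-- ===== SOURCE B (Python) =====
-- def dataType(vI):
--     vI = list(vI)
--     if not vI:
--         return -1
--     mx = max(vI)
--     mn = min(vI)
--     if mx <= 0:
--         return -1
--     if mn >= 0:
--         return 1
--     return 0
-- ===== Notes on version B (the rewrite author's own statement) =====
-- stated objective: simpler
-- what changed: Replaces the per-element positive/negative counting pass and count-based branch chain with an aggregate classification over max(vI) and min(vI), with an explicit empty-list guard.
import Mathlib
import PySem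

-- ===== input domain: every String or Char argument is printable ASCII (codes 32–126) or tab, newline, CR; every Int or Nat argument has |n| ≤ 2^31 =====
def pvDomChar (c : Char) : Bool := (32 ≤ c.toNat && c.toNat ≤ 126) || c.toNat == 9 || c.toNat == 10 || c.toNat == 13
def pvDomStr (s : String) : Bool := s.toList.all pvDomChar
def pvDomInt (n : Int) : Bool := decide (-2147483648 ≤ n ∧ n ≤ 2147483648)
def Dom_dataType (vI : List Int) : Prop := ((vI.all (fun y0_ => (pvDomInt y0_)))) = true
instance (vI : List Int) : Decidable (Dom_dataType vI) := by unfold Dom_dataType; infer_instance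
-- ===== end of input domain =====

-- B replaces A's positive/negative counting pass with a max/min aggregate classification (objective: simpler).

-- ===== PORT A =====
-- the loop body of A: update (iPos, iNeg) for one element
def pvStepA : Int × Int → Int → Int × Int := fun s i =>
  if i > 0 then (s.1 + 1, s.2) else if i < 0 then (s.1, s.2 + 1) else s

-- literal port of A: a fold keeping (iPos, iNeg), then the branch chain on the counts
def dataType (vI : List Int) : Int :=
  let s := vI.foldl pvStepA (0, 0)
  if s.1 > 0 ∧ s.2 = 0 then 1
  else if s.1 = 0 ∧ s.2 ≥ 0 then -1
  else 0

-- ===== PORT B =====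
-- literal port of B: empty guard, then max/min over the list (Python max/min on a nonempty list)
def dataType_alt (vI : List Int) : Int :=
  match vI with
  | [] => -1
  | h :: t =>
    let mx := t.foldl max h
    let mn := t.foldl min h
    if mx ≤ 0 then -1
    else if mn ≥ 0 then 1
    else 0

-- ===== PRECONDITION & SPEC =====
def Spec_dataType (vI : List Int) (out : Int) : Prop := out = dataType_alt vI
instance (vI : List Int) (out : Int) : Decidable (Spec_dataType vI out) := by unfold Spec_dataType; infer_instance

-- ===== CLAIM (what is proved, stated in full; the proofs are below) =====
def Claim_equal_dataType : Prop := ∀ (vI : List Int), Dom_dataType vI → Spec_dataType vI (dataType vI)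

-- ===== LEMMAS AND PROOFS =====

theorem pvFoldA_char (vI : List Int) (p n : Int) :
    vI.foldl pvStepA (p, n) =
      (p + ((vI.filter (fun i => decide (0 < i))).length : Int),
       n + ((vI.filter (fun i => decide (i < 0))).length : Int)) := by
  induction vI generalizing p n with
  | nil => simp
  | cons h t ih =>
    simp only [List.foldl_cons, List.filter_cons, pvStepA]
    by_cases h1 : (0:Int) < h
    · have h2 : ¬ h < 0 := by omega
      simp [h1, h2, ih]; ring
    · by_cases h2 : h < 0
      · simp [h1, h2, ih]; ring
      · simp [show ¬ h > 0 from h1, h2, ih]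

theorem pvFilterPos_len (vI : List Int) :
    ((vI.filter (fun i => decide (0 < i))).length = 0) ↔ ¬ ∃ x ∈ vI, 0 < x := by
  rw [List.length_eq_zero_iff, List.filter_eq_nil_iff]
  simp

theorem pvFilterNeg_len (vI : List Int) :
    ((vI.filter (fun i => decide (i < 0))).length = 0) ↔ ¬ ∃ x ∈ vI, x < 0 := by
  rw [List.length_eq_zero_iff, List.filter_eq_nil_iff]
  simp

theorem pvFoldMax_pos (t : List Int) (a : Int) :
    (0 < t.foldl max a) ↔ 0 < a ∨ ∃ x ∈ t, 0 < x := by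
  induction t generalizing a with
  | nil => simp
  | cons h tl ih =>
    simp only [List.foldl_cons, ih, lt_max_iff, List.mem_cons]
    constructor
    · rintro (⟨h1 | h1⟩ | ⟨x, hx, h1⟩)
      · exact Or.inl h1
      · exact Or.inr ⟨h, Or.inl rfl, h1⟩
      · exact Or.inr ⟨x, Or.inr hx, h1⟩
    · rintro (h1 | ⟨x, (rfl | hx), h1⟩)
      · exact Or.inl (Or.inl h1)
      · exact Or.inl (Or.inr h1)
      · exact Or.inr ⟨x, hx, h1⟩

theorem pvFoldMin_neg (t : List Int) (a : Int) :
    (t.foldl min a < 0) ↔ a < 0 ∨ ∃ x ∈ t, x < 0 := by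
  induction t generalizing a with
  | nil => simp
  | cons h tl ih =>
    simp only [List.foldl_cons, ih, min_lt_iff, List.mem_cons]
    constructor
    · rintro (⟨h1 | h1⟩ | ⟨x, hx, h1⟩)
      · exact Or.inl h1
      · exact Or.inr ⟨h, Or.inl rfl, h1⟩
      · exact Or.inr ⟨x, Or.inr hx, h1⟩
    · rintro (h1 | ⟨x, (rfl | hx), h1⟩)
      · exact Or.inl (Or.inl h1)
      · exact Or.inl (Or.inr h1)
      · exact Or.inr ⟨x, hx, h1⟩

-- ===== VERDICT (by name: the statement is the Claim_ definition above) =====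
theorem dataType_spec : Claim_equal_dataType := by
  intro vI _
  unfold Spec_dataType
  rcases vI with _ | ⟨h, t⟩
  · simp [dataType, dataType_alt]
  · simp only [dataType, dataType_alt, pvFoldA_char, zero_add]
    have hP := pvFilterPos_len (h :: t)
    have hN := pvFilterNeg_len (h :: t)
    have hMx : (0 < t.foldl max h) ↔ ∃ x ∈ h :: t, 0 < x := by
      rw [pvFoldMax_pos]; simp
    have hMn : (t.foldl min h < 0) ↔ ∃ x ∈ h :: t, x < 0 := by
      rw [pvFoldMin_neg]; simp
    by_cases hpos : ∃ x ∈ h :: t, 0 < x <;> by_cases hneg : ∃ x ∈ h :: t, x < 0 <;>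
      simp only [hpos, hneg, iff_true, iff_false, not_true, not_false_iff] at hP hN hMx hMn <;>
      split_ifs <;> omega
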